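-- pv_equiv track=rewrite | github.com/NightSkumbry/shvetsov | kompege/19/11951.py | f
-- ===== SOURCE A (Python) =====
-- def f(player, w, c=''):
--     if c in w or len(w) == 1:
--         if len(w) == 1:
--             c = w[0]
--         if len(c)%2 == 1-player:
--             return {c}
--         return set()
--
--     w = list(filter(lambda x: c == x[:len(c)], w))
--     l = set(map(lambda x: x[len(c)], w))
--
--     if len(c)%2 == player:
--         a = set()
--         for i in l:
--             a |= f(player, w, c+i)
--         return a
--     a = set()
--     for i in l:
--         g = f(player, w, c+i)
--         if g:
--             a |= g
--         else:
--             a = set()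
--             break
--     return a
-- ===== SOURCE B (Python) =====
-- def f(player, w, c=''):
--     # Build an explicit trie (count, is_word, first word, children) over the words
--     # extending c in ONE pass, then evaluate the game on the trie: no word-list
--     # filtering per node, and a count==1 shortcut replaces A's extra recursion level.
--     if c in w or len(w) == 1:
--         word = w[0] if len(w) == 1 else c
--         return {word} if len(word) % 2 == 1 - player else set()
--     root = [0, False, None, {}]
--     for x in w:
--         if x.startswith(c):
--             node = root
--             node[0] += 1
--             if node[2] is None:
--                 node[2] = x
--             for ch in x[len(c):]:
--                 node = node[3].setdefault(ch, [0, False, None, {}])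
--                 node[0] += 1
--                 if node[2] is None:
--                     node[2] = x
--             node[1] = True
--
--     def win(node, d):
--         if node[1]:
--             return {d} if len(d) % 2 == 1 - player else set()
--         if node[0] == 1:
--             word = node[2]
--             return {word} if len(word) % 2 == 1 - player else set()
--         a = set()
--         if len(d) % 2 == player:
--             for ch, child in node[3].items():
--                 a |= win(child, d + ch)
--             return a
--         for ch, child in node[3].items():
--             g = win(child, d + ch)
--             if not g:
--                 return set()
--             a |= g
--         return a
--
--     return win(root, c)
-- ===== Notes on version B (the rewrite author's own statement) =====
-- stated objective: alternative
-- what changed: B builds an explicit trie (count, word-end flag, first-word representative, children) over the words extending c in one pass and then evaluates the game by structural traversal of the trie -- no word lists are carried or re-filtered per node, and a count==1 shortcut with the stored representative replaces A's extra recursion level for forced lines.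
import Mathlib
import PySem

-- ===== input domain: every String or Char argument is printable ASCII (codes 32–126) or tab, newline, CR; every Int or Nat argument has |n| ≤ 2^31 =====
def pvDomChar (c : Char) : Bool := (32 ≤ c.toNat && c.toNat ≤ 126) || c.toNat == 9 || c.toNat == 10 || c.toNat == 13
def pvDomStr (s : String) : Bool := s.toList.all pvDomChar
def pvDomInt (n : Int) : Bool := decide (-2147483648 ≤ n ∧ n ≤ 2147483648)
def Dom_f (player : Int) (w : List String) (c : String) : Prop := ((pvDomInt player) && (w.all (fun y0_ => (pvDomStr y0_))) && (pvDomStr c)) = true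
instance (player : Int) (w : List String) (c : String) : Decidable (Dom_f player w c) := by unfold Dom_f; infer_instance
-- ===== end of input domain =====

-- B replaces A's re-filtered word-list recursion by an explicit trie: one insertion pass
-- builds (count, word-end flag, first-word representative, children) per node, and a
-- structural traversal of the trie evaluates the game (count==1 uses the representative).

-- shared tiny helper: the Python expression x[len(c)] (A's source contains it verbatim);
-- the default ' ' is unreachable: every word reaching it strictly extends c
def nextKey (c : String) (x : String) : Char :=
  (PySem.Str.pyGet? x (PySem.Str.len c)).getD ' '

-- measure for termination of A's port (not part of either Python's semantics)
def maxLen (w : List String) : Nat := w.foldr (fun s m => max s.toList.length m) 0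

theorem le_maxLen_of_mem {x : String} {w : List String} (h : x ∈ w) :
    x.toList.length ≤ maxLen w := by
  induction w with
  | nil => cases h
  | cons y t ih =>
    rcases List.mem_cons.mp h with h | h
    · subst h; simp [maxLen]
    · have := ih h; simp only [maxLen, List.foldr] at *; omega

theorem maxLen_le_of_subset {v w : List String} (h : ∀ x ∈ v, x ∈ w) :
    maxLen v ≤ maxLen w := by
  induction v with
  | nil => simp [maxLen]
  | cons y t ih =>
    have h1 : y.toList.length ≤ maxLen w := le_maxLen_of_mem (h y (by simp))
    have h2 : maxLen t ≤ maxLen w := ih (fun x hx => h x (by simp [hx]))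
    simp only [maxLen, List.foldr] at *; omega

theorem measure_lt {w v : List String} {c : String}
    (hsub : ∀ x ∈ v, x ∈ w) (hne : v ≠ [])
    (hlen : ∀ x ∈ v, c.toList.length + 1 ≤ x.toList.length) :
    maxLen v + 1 - (c.toList.length + 1) < maxLen w + 1 - c.toList.length := by
  rcases v with _ | ⟨x, t⟩
  · exact absurd rfl hne
  · have h1 : c.toList.length + 1 ≤ x.toList.length := hlen x (by simp)
    have h2 : x.toList.length ≤ maxLen (x :: t) := le_maxLen_of_mem (by simp)
    have h3 : maxLen (x :: t) ≤ maxLen w := maxLen_le_of_subset hsub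
    omega

-- a word that starts with c and is not c itself strictly extends c
theorem strict_ext_len {c x : String}
    (hpre : c.toList <+: x.toList) (hne : x ≠ c) :
    c.toList.length + 1 ≤ x.toList.length := by
  have hle := hpre.length_le
  rcases Nat.lt_or_ge c.toList.length x.toList.length with h | h
  · omega
  · have hcx : c = x := String.toList_inj.mp (hpre.eq_of_length (by omega))
    exact absurd hcx.symm hne

-- A's filter test 'c == x[:len(c)]' holds iff c.toList is a prefix of x.toList
theorem slice_test_iff (c x : String) :
    (c == PySem.Str.slice x none (some (PySem.Str.len c))) = true ↔ c.toList <+: x.toList := by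
  have hlist : (PySem.Str.slice x none (some (PySem.Str.len c))).toList
      = x.toList.take c.toList.length := by
    rw [PySem.Str.toList_slice, PySem.Chars.slice_eq_listSlice, PySem.Str.len_eq,
      PySem.List.slice_to_natCast]
  constructor
  · intro h
    have : c.toList = x.toList.take c.toList.length := by
      have := String.toList_inj.mpr (eq_of_beq h)
      rw [hlist] at this; exact this
    rw [this]; exact List.take_prefix _ _
  · intro h
    have : c.toList = x.toList.take c.toList.length := (List.prefix_iff_eq_take.mp h)
    apply beq_iff_eq.mpr
    apply String.toList_inj.mp
    rw [hlist]; exact this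

-- ===== PORT A =====
-- w = list(filter(lambda x: c == x[:len(c)], w))
def filterPrefix (c : String) (w : List String) : List String :=
  w.filter (fun x => c == PySem.Str.slice x none (some (PySem.Str.len c)))

-- l = set(map(lambda x: x[len(c)], w))
def nextChars (c : String) (wf : List String) : PySem.Set Char :=
  PySem.Set.ofList (wf.map (nextKey c))

-- A's opponent loop: 'for i in l: g = f(...); if g: a |= g  else: a = set(); break'
def oppLoopA : List (List String) → PySem.Set String → PySem.Set String
  | [], a => a
  | g :: r, a => if g == [] then [] else oppLoopA r (PySem.Set.union a g)

def f (player : Int) (w : List String) (c : String) : List String :=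
  if w.contains c || w.length == 1 then
    let c := if w.length == 1 then w.headD "" else c
    if PySem.Str.len c % 2 == 1 - player then [c] else []
  else
    let wf := filterPrefix c w
    let l := nextChars c wf
    let gs := l.attach.map (fun i => f player wf (c.push i.1))
    if PySem.Str.len c % 2 == player then
      gs.foldl (fun a g => PySem.Set.union a g) ([] : PySem.Set String)
    else
      oppLoopA gs []
termination_by maxLen w + 1 - c.toList.length
decreasing_by
  rename_i hcond
  simp only [Bool.or_eq_true, not_or] at hcond
  have hi : (i : Char) ∈ PySem.Set.ofList ((filterPrefix c w).map (nextKey c)) := i.2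
  rw [PySem.Set.mem_ofList] at hi
  obtain ⟨x0, hx0, -⟩ := List.mem_map.mp hi
  have hne : filterPrefix c w ≠ [] := fun h => by rw [h] at hx0; cases hx0
  have hlen : ∀ x ∈ filterPrefix c w, c.toList.length + 1 ≤ x.toList.length := by
    intro x hx
    simp only [filterPrefix] at hx; rw [List.mem_filter] at hx
    have hp := (slice_test_iff c x).mp hx.2
    refine strict_ext_len hp (fun hxc => ?_)
    exact hcond.1 (by subst hxc; exact List.contains_iff_mem.mpr hx.1)
  have hpush : (c.push i.1).toList.length = c.toList.length + 1 := by simp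
  rw [hpush]
  exact measure_lt
    (fun x hx => List.mem_of_mem_filter (by simp only [filterPrefix] at hx; exact hx)) hne hlen

-- ===== PORT B =====
-- the trie node [count, is_word, rep, children]; children is its own inductive list
-- (no nested inductive), in Python-dict insertion order
mutual
inductive Trie where
  | mk : Nat → Bool → Option String → TChildren → Trie
inductive TChildren where
  | nil : TChildren
  | cons : Char → Trie → TChildren → TChildren
end

-- [0, False, None, {}]
def emptyT : Trie := .mk 0 false none .nil

-- the insertion pass: per visited node count += 1, rep set if None, descend via
-- setdefault; at the end of the suffix set is_word
mutual
def insertT : Trie → List Char → String → Trie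
  | .mk n _ r ch, [], x => .mk (n + 1) true (some (r.getD x)) ch
  | .mk n e r ch, k :: rest, x => .mk (n + 1) e (some (r.getD x)) (insertC ch k rest x)
  termination_by _t s _x => (s.length, 0)
def insertC : TChildren → Char → List Char → String → TChildren
  | .nil, k, rest, x => .cons k (insertT emptyT rest x) .nil
  | .cons k' t r, k, rest, x =>
      if k' == k then .cons k' (insertT t rest x) r else .cons k' t (insertC r k rest x)
  termination_by ch _k s _x => (s.length, sizeOf ch + 1)
end

-- the evaluation pass 'win(node, d)' with its two accumulation loops
mutual
def win (player : Int) : Trie → String → List String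
  | .mk n e r ch, d =>
    if e then (if PySem.Str.len d % 2 == 1 - player then [d] else [])
    else if n == 1 then
      let word := r.getD ""
      (if PySem.Str.len word % 2 == 1 - player then [word] else [])
    else if PySem.Str.len d % 2 == player then winU player ch d []
    else winO player ch d []
def winU (player : Int) : TChildren → String → PySem.Set String → PySem.Set String
  | .nil, _, a => a
  | .cons k t rest, d, a => winU player rest d (PySem.Set.union a (win player t (d.push k)))
def winO (player : Int) : TChildren → String → PySem.Set String → PySem.Set String
  | .nil, _, a => a
  | .cons k t rest, d, a =>
      let g := win player t (d.push k)
      if g.isEmpty then [] else winO player rest d (PySem.Set.union a g)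
end

def f_alt (player : Int) (w : List String) (c : String) : List String :=
  if w.contains c || w.length == 1 then
    let word := if w.length == 1 then w.headD "" else c
    if PySem.Str.len word % 2 == 1 - player then [word] else []
  else
    let root := w.foldl (fun t x =>
      if PySem.Str.startswith x c
      then insertT t (PySem.Str.slice x (some (PySem.Str.len c)) none).toList x
      else t) emptyT
    win player root c

-- ===== PRECONDITION & SPEC =====
def Spec_f (player : Int) (w : List String) (c : String) (out : List String) : Prop := out = f_alt player w c
instance (player : Int) (w : List String) (c : String) (out : List String) : Decidable (Spec_f player w c out) := by unfold Spec_f; infer_instance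

-- ===== CLAIM (what is proved, stated in full; the proofs are below) =====
def Claim_equal_f : Prop := ∀ (player : Int) (w : List String) (c : String), Dom_f player w c → Spec_f player w c (f player w c)

-- ===== LEMMAS AND PROOFS =====

theorem f_eq (player : Int) (w : List String) (c : String) : f player w c =
    if w.contains c || w.length == 1 then
      (if PySem.Str.len (if w.length == 1 then w.headD "" else c) % 2 == 1 - player
       then [if w.length == 1 then w.headD "" else c] else [])
    else
      (if PySem.Str.len c % 2 == player then
        ((nextChars c (filterPrefix c w)).map
          (fun i => f player (filterPrefix c w) (c.push i))).foldl
            (fun a g => PySem.Set.union a g) []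
       else oppLoopA ((nextChars c (filterPrefix c w)).map
          (fun i => f player (filterPrefix c w) (c.push i))) []) := by
  rw [f]
  simp only [List.map_subtype, List.unattach_attach]

-- proofs-only helpers: list form of the trie children, buckets by next character,
-- and the canonical shape 'specT' of a trie built from a word list

def ofPairs : List (Char × Trie) → TChildren
  | [] => .nil
  | (k, t) :: r => .cons k t (ofPairs r)

-- x[len(c):] as a plain drop
theorem suffix_toList (c x : String) :
    (PySem.Str.slice x (some (PySem.Str.len c)) none).toList = x.toList.drop c.toList.length := by
  rw [PySem.Str.toList_slice, PySem.Chars.slice_eq_listSlice, PySem.Str.len_eq,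
    PySem.List.slice_from_natCast]

def buildFold (c : String) (ws : List String) : Trie :=
  ws.foldl (fun t x => insertT t (x.toList.drop c.toList.length) x) emptyT

theorem buildFold_snoc (c : String) (u : List String) (x : String) :
    buildFold c (u ++ [x]) = insertT (buildFold c u) (x.toList.drop c.toList.length) x := by
  simp [buildFold]

def bucketOf (c : String) (i : Char) (u : List String) : List String :=
  u.filter (fun y => nextKey c y == i)

def keysOf (c : String) (ws : List String) : List Char :=
  PySem.Set.ofList ((ws.filter (fun x => !(x == c))).map (nextKey c))

def specT (c : String) (ws : List String) : Trie :=
  .mk ws.length (ws.contains c) ws.head?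
    (ofPairs ((keysOf c ws).map
      (fun i => (i, buildFold (c.push i) (bucketOf c i (ws.filter (fun x => !(x == c))))))))

theorem nextKey_of_append {c x : String} {j : Char} {t : List Char}
    (h : x.toList = c.toList ++ j :: t) : nextKey c x = j := by
  unfold nextKey
  rw [PySem.Str.len_eq, PySem.Str.pyGet?_natCast, h,
    List.getElem?_append_right (le_refl _)]
  simp

theorem exists_ext {c x : String} (hpre : c.toList <+: x.toList) (hne : x ≠ c) :
    ∃ j t, x.toList = c.toList ++ j :: t := by
  obtain ⟨t, ht⟩ := hpre
  cases t with
  | nil =>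
    exact absurd (String.toList_inj.mp (by rw [← ht, List.append_nil])).symm hne
  | cons j t => exact ⟨j, t, ht.symm⟩

theorem prefix_push_iff {c x : String} {i : Char}
    (hpre : c.toList <+: x.toList) (hne : x ≠ c) :
    ((c.push i).toList <+: x.toList) ↔ nextKey c x = i := by
  obtain ⟨j, t, hx⟩ := exists_ext hpre hne
  rw [String.toList_push, hx, nextKey_of_append hx,
    List.prefix_append_right_inj, List.cons_prefix_cons]
  simp [eq_comm]

theorem sliceTest_push {c x : String} {i : Char}
    (hpre : c.toList <+: x.toList) (hne : x ≠ c) :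
    (c.push i == PySem.Str.slice x none (some (PySem.Str.len (c.push i))))
      = (nextKey c x == i) := by
  apply Bool.coe_iff_coe.mp
  rw [slice_test_iff, beq_iff_eq]
  exact prefix_push_iff hpre hne

theorem filterPrefix_eq_startswith (c : String) (w : List String) :
    filterPrefix c w = w.filter (fun x => PySem.Str.startswith x c) := by
  unfold filterPrefix
  refine List.filter_congr (fun x _ => ?_)
  apply Bool.coe_iff_coe.mp
  rw [slice_test_iff, PySem.Str.startswith_eq, PySem.Chars.startswith_iff]

theorem filterPrefix_push_eq {v : List String} {c : String} {i : Char}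
    (hpre : ∀ x ∈ v, c.toList <+: x.toList) (hnc : ∀ x ∈ v, x ≠ c) :
    filterPrefix (c.push i) v = bucketOf c i v := by
  unfold filterPrefix bucketOf
  exact List.filter_congr (fun x hx => sliceTest_push (hpre x hx) (hnc x hx))

theorem union_nil_left (g : List String) :
    PySem.Set.union [] g = PySem.Set.ofList g := by
  simp only [PySem.Set.union, PySem.Set.update, PySem.Set.ofList_eq_foldl]

theorem bucketOf_append (c : String) (i : Char) (u : List String) (x : String) :
    bucketOf c i (u ++ [x]) = bucketOf c i u ++ (if nextKey c x == i then [x] else []) := by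
  simp [bucketOf, List.filter_append, List.filter_singleton]

theorem bucketOf_append_self (c : String) (u : List String) (x : String) :
    bucketOf c (nextKey c x) (u ++ [x]) = bucketOf c (nextKey c x) u ++ [x] := by
  rw [bucketOf_append]; simp

theorem bucketOf_append_ne (c : String) {i : Char} (u : List String) {x : String}
    (h : nextKey c x ≠ i) : bucketOf c i (u ++ [x]) = bucketOf c i u := by
  rw [bucketOf_append]; simp [h]

theorem ofList_append_singleton {α : Type} [BEq α] [LawfulBEq α] (xs : List α) (k : α) :
    PySem.Set.ofList (xs ++ [k])
      = (if k ∈ PySem.Set.ofList xs then PySem.Set.ofList xs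
         else PySem.Set.ofList xs ++ [k]) := by
  rw [PySem.Set.ofList_eq_foldl, List.foldl_append]
  simp only [List.foldl]
  rw [← PySem.Set.ofList_eq_foldl]
  by_cases hm : k ∈ PySem.Set.ofList xs
  · rw [if_pos hm]
    have hmx : k ∈ xs := by rw [← PySem.Set.mem_ofList]; exact hm
    simp [PySem.Set.add, hmx]
  · rw [if_neg hm]
    have hmx : k ∉ xs := by rw [← PySem.Set.mem_ofList]; exact hm
    simp [PySem.Set.add, hmx]

-- membership in the word list and in its i-bucket agree for the extended prefix c+i
theorem contains_push_bucket (v : List String) (c : String) (i : Char) :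
    v.contains (c.push i) = (bucketOf c i v).contains (c.push i) := by
  apply Bool.coe_iff_coe.mp
  rw [List.contains_iff_mem, List.contains_iff_mem]
  unfold bucketOf
  rw [List.mem_filter]
  constructor
  · intro h
    refine ⟨h, ?_⟩
    have : (c.push i).toList = c.toList ++ i :: [] := by simp
    simp [nextKey_of_append this]
  · exact fun h => h.1

-- the shrink lemma: A recursing on the whole filtered list equals A recursing on the bucket
theorem shrink (player : Int) (v : List String) (c : String) (i : Char)
    (hpre : ∀ x ∈ v, c.toList <+: x.toList)
    (hnc : ∀ x ∈ v, x ≠ c)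
    (hb : bucketOf c i v ≠ []) :
    f player v (c.push i) = f player (bucketOf c i v) (c.push i) := by
  have hbsub : ∀ x ∈ bucketOf c i v, x ∈ v := fun x hx => List.mem_of_mem_filter hx
  have hbkey : ∀ x ∈ bucketOf c i v, nextKey c x = i := fun x hx => by
    have := List.of_mem_filter hx; simpa using this
  have hbpre : ∀ x ∈ bucketOf c i v, (c.push i).toList <+: x.toList := fun x hx =>
    (prefix_push_iff (hpre x (hbsub x hx)) (hnc x (hbsub x hx))).mpr (hbkey x hx)
  by_cases hv1 : v.length = 1
  · rcases v with _ | ⟨x, t⟩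
    · simp at hv1
    · rcases t with _ | ⟨y, t⟩
      · have hbx : bucketOf c i [x] = [x] := by
          rcases h : (nextKey c x == i) with _ | _
          · exact absurd (by unfold bucketOf; simp [h]) hb
          · unfold bucketOf; simp [h]
        rw [hbx]
      · simp at hv1
  · have hv1' : (v.length == 1) = false := by simp [hv1]
    by_cases hcv : (c.push i) ∈ v
    · have hcb : (c.push i) ∈ bucketOf c i v := by
        have h := contains_push_bucket v c i
        rw [← List.contains_iff_mem, h, List.contains_iff_mem] at hcv
        exact hcv
      have h1 : (v.contains (c.push i) || v.length == 1) = true := by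
        rw [Bool.or_eq_true, List.contains_iff_mem]; exact Or.inl hcv
      have h2 : ((bucketOf c i v).contains (c.push i) || (bucketOf c i v).length == 1) = true := by
        rw [Bool.or_eq_true, List.contains_iff_mem]; exact Or.inl hcb
      rw [f_eq, f_eq, if_pos h1, if_pos h2]
      simp only [hv1', Bool.false_eq_true, if_false]
      by_cases hb1 : (bucketOf c i v).length = 1
      · have hbc : bucketOf c i v = [c.push i] := by
          rcases hbl : bucketOf c i v with _ | ⟨u, t⟩
          · simp [hbl] at hb1
          · rcases t with _ | ⟨z, t⟩
            · rw [hbl] at hcb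
              rw [List.mem_singleton.mp hcb]
            · simp [hbl] at hb1
        rw [hbc]
        rfl
      · have hb1' : ((bucketOf c i v).length == 1) = false := by simp [hb1]
        simp only [hb1', Bool.false_eq_true, if_false]
    · have hfv : filterPrefix (c.push i) v = bucketOf c i v :=
        filterPrefix_push_eq hpre hnc
      have hcb : (c.push i) ∉ bucketOf c i v := fun h => hcv (hbsub _ h)
      have hcv' : v.contains (c.push i) = false := by
        rw [Bool.eq_false_iff]; intro h; exact hcv (List.contains_iff_mem.mp h)
      have hcb' : (bucketOf c i v).contains (c.push i) = false := by
        rw [Bool.eq_false_iff]; intro h; exact hcb (List.contains_iff_mem.mp h)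
      have hfb : filterPrefix (c.push i) (bucketOf c i v) = bucketOf c i v := by
        rw [filterPrefix_eq_startswith]
        refine List.filter_eq_self.mpr (fun x hx => ?_)
        rw [PySem.Str.startswith_eq, PySem.Chars.startswith_iff]
        exact hbpre x hx
      by_cases hb1 : (bucketOf c i v).length = 1
      · rcases hbl : bucketOf c i v with _ | ⟨u, t⟩
        · exact absurd hbl hb
        · rcases t with _ | ⟨z, t⟩
          · rw [f_eq, hcv', hv1']
            simp only [Bool.or_self, Bool.false_eq_true, if_false]
            rw [hfv, hbl]
            have hl : nextChars (c.push i) [u] = [nextKey (c.push i) u] := rfl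
            rw [hl]
            simp only [List.map_cons, List.map_nil]
            have hinner : ∀ d : String, f player [u] d =
                (if PySem.Str.len u % 2 == 1 - player then [u] else []) := by
              intro d
              rw [f_eq]
              simp
            rw [hinner, f_eq]
            simp only [List.length_cons, List.length_nil, Nat.zero_add, BEq.rfl,
              Bool.or_true, if_pos, List.headD]
            rcases hbase : (PySem.Str.len u % 2 == 1 - player) with _ | _
            · simp only [Bool.false_eq_true, if_false]
              rcases hpar : (PySem.Str.len (c.push i) % 2 == player) with _ | _
              · simp [oppLoopA]
              · simp [union_nil_left, PySem.Set.ofList]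
            · simp only [if_pos]
              rcases hpar : (PySem.Str.len (c.push i) % 2 == player) with _ | _
              · simp [oppLoopA, union_nil_left, PySem.Set.ofList, PySem.Set.add]
              · simp [union_nil_left, PySem.Set.ofList, PySem.Set.add]
          · simp [hbl] at hb1
      · have hb1' : ((bucketOf c i v).length == 1) = false := by simp [hb1]
        rw [f_eq]
        conv_rhs => rw [f_eq]
        simp only [hcv', hcb', hv1', hb1', Bool.or_self, Bool.false_eq_true, if_false,
          hfv, hfb]

-- === the trie built by the insertion pass has the canonical shape 'specT' ===

theorem head?_snoc {α : Type} (v : List α) (x : α) :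
    (v ++ [x]).head? = some ((v.head?).getD x) := by
  cases v <;> simp

theorem drop_cons_of_ext {c x : String} (hpre : c.toList <+: x.toList) (hne : x ≠ c) :
    x.toList.drop c.toList.length
      = nextKey c x :: x.toList.drop (c.toList.length + 1) := by
  obtain ⟨j, t, hx⟩ := exists_ext hpre hne
  have h1 : x.toList.drop c.toList.length = j :: t := by
    rw [hx, List.drop_left]
  have h2 : x.toList.drop (c.toList.length + 1) = t := by
    have hx' : x.toList = (c.toList ++ [j]) ++ t := by rw [hx]; simp
    rw [hx']
    have hl : ((c.toList ++ [j]) ++ t).drop ((c.toList ++ [j]).length) = t :=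
      List.drop_left
    simpa using hl
  rw [h1, h2, nextKey_of_append hx]

theorem push_toList_length (c : String) (i : Char) :
    (c.push i).toList.length = c.toList.length + 1 := by simp

theorem insertT_bucket_snoc (c : String) (u : List String) (x : String) :
    insertT (buildFold (c.push (nextKey c x)) (bucketOf c (nextKey c x) u))
        (x.toList.drop (c.toList.length + 1)) x
      = buildFold (c.push (nextKey c x)) (bucketOf c (nextKey c x) (u ++ [x])) := by
  rw [bucketOf_append_self, buildFold_snoc, push_toList_length]

theorem insertC_spec (c x : String) :
    ∀ (ks : List Char) (u : List String), ks.Nodup →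
    (nextKey c x ∉ ks → ∀ y ∈ u, nextKey c y ≠ nextKey c x) →
    insertC (ofPairs (ks.map (fun i => (i, buildFold (c.push i) (bucketOf c i u)))))
        (nextKey c x) (x.toList.drop (c.toList.length + 1)) x
      = ofPairs ((if nextKey c x ∈ ks then ks else ks ++ [nextKey c x]).map
          (fun i => (i, buildFold (c.push i) (bucketOf c i (u ++ [x]))))) := by
  intro ks
  induction ks with
  | nil =>
    intro u _ hmem
    have hb : bucketOf c (nextKey c x) u = [] :=
      List.filter_eq_nil_iff.mpr (fun y hy => by
        simpa using hmem (by simp) y hy)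
    have hbx : bucketOf c (nextKey c x) (u ++ [x]) = [x] := by
      rw [bucketOf_append_self, hb, List.nil_append]
    have hone : buildFold (c.push (nextKey c x)) [x]
        = insertT emptyT (x.toList.drop (c.toList.length + 1)) x := by
      simp [buildFold]
    simp [ofPairs, insertC, hbx, hone]
  | cons k ks ih =>
    intro u hnd hmem
    by_cases hk : k = nextKey c x
    · subst hk
      simp only [List.map_cons, ofPairs, insertC, BEq.rfl, if_pos]
      rw [if_pos (by simp)]
      simp only [List.map_cons, ofPairs]
      rw [insertT_bucket_snoc]
      refine congrArg _ ?_
      refine congrArg _ ?_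
      refine List.map_congr_left (fun j hj => ?_)
      have hjk : nextKey c x ≠ j := fun h => (List.nodup_cons.mp hnd).1 (h ▸ hj)
      rw [bucketOf_append_ne c u hjk]
    · have hbk : (k == nextKey c x) = false := by simp [hk]
      simp only [List.map_cons, ofPairs, insertC, hbk, Bool.false_eq_true, if_false]
      rw [ih u (List.nodup_cons.mp hnd).2
        (fun hnm y hy => hmem (by simp [Ne.symm hk, hnm]) y hy)]
      by_cases hm : nextKey c x ∈ ks
      · rw [if_pos hm, if_pos (List.mem_cons_of_mem _ hm), List.map_cons,
          bucketOf_append_ne c u (fun h => hk h.symm)]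
        rfl
      · rw [if_neg hm, if_neg (by simp [hm, Ne.symm hk]), List.cons_append,
          List.map_cons, bucketOf_append_ne c u (fun h => hk h.symm)]
        rfl

theorem filter_ne_snoc_self (v : List String) (c : String) :
    (v ++ [c]).filter (fun y => !(y == c)) = v.filter (fun y => !(y == c)) := by
  simp [List.filter_append]

theorem filter_ne_snoc {v : List String} {c x : String} (h : x ≠ c) :
    (v ++ [x]).filter (fun y => !(y == c)) = v.filter (fun y => !(y == c)) ++ [x] := by
  simp [List.filter_append, h]

theorem keysOf_snoc_self (c : String) (v : List String) :
    keysOf c (v ++ [c]) = keysOf c v := by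
  unfold keysOf
  rw [filter_ne_snoc_self]

theorem contains_snoc_ne {v : List String} {c x : String} (h : x ≠ c) :
    (v ++ [x]).contains c = v.contains c := by
  apply Bool.coe_iff_coe.mp
  rw [List.contains_iff_mem, List.contains_iff_mem, List.mem_append, List.mem_singleton]
  constructor
  · rintro (hm | hm)
    · exact hm
    · exact absurd hm.symm h
  · exact Or.inl

theorem insert_specT (c : String) (v : List String) (x : String)
    (hx : c.toList <+: x.toList) :
    insertT (specT c v) (x.toList.drop c.toList.length) x = specT c (v ++ [x]) := by
  by_cases hxc : x = c
  · subst hxc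
    have hdrop : x.toList.drop x.toList.length = ([] : List Char) := List.drop_length
    rw [hdrop]
    have hlen : (v ++ [x]).length = v.length + 1 := by simp
    have hcont : (v ++ [x]).contains x = true := List.contains_iff_mem.mpr (by simp)
    conv_rhs => rw [specT]
    rw [hlen, hcont, head?_snoc, keysOf_snoc_self]
    simp only [filter_ne_snoc_self]
    rw [specT]
    simp [insertT]
  · have hkey : keysOf c (v ++ [x])
        = (if nextKey c x ∈ keysOf c v then keysOf c v else keysOf c v ++ [nextKey c x]) := by
      unfold keysOf
      rw [filter_ne_snoc hxc, List.map_append, List.map_singleton, ofList_append_singleton]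
    have hlen : (v ++ [x]).length = v.length + 1 := by simp
    conv_rhs => rw [specT]
    rw [hlen, contains_snoc_ne hxc, head?_snoc, hkey]
    simp only [filter_ne_snoc hxc]
    rw [drop_cons_of_ext hx hxc, specT]
    simp only [insertT]
    rw [insertC_spec c x (keysOf c v) (v.filter (fun y => !(y == c)))
      (PySem.Set.nodup_ofList _)
      (fun hnm y hy hk => hnm (by
        rw [keysOf, PySem.Set.mem_ofList]
        exact List.mem_map.mpr ⟨y, hy, hk⟩))]

theorem specT_nil (c : String) : specT c [] = emptyT := by
  rfl

theorem buildFold_eq (c : String) (ws : List String)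
    (h : ∀ x ∈ ws, c.toList <+: x.toList) :
    buildFold c ws = specT c ws := by
  suffices key : ∀ (u v : List String), (∀ x ∈ u, c.toList <+: x.toList) →
      u.foldl (fun t x => insertT t (x.toList.drop c.toList.length) x) (specT c v)
        = specT c (v ++ u) by
    have := key ws [] h
    rw [List.nil_append] at this
    rw [buildFold, ← specT_nil c, this]
  intro u
  induction u with
  | nil => intro v _; simp
  | cons x r ihr =>
    intro v hu
    simp only [List.foldl_cons]
    rw [insert_specT c v x (hu x (by simp)), ihr (v ++ [x]) (fun y hy => hu y (by simp [hy]))]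
    simp

-- === the evaluation pass over a canonical trie is A's recursion ===

theorem winU_ofPairs (player : Int) (d : String) :
    ∀ (ps : List (Char × Trie)) (a : PySem.Set String),
    winU player (ofPairs ps) d a
      = (ps.map (fun p => win player p.2 (d.push p.1))).foldl
          (fun a g => PySem.Set.union a g) a := by
  intro ps
  induction ps with
  | nil => intro a; rfl
  | cons p r ih =>
    intro a
    obtain ⟨k, t⟩ := p
    simp only [ofPairs, winU, List.map_cons, List.foldl_cons]
    exact ih _

theorem winO_ofPairs (player : Int) (d : String) :
    ∀ (ps : List (Char × Trie)) (a : PySem.Set String),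
    winO player (ofPairs ps) d a
      = oppLoopA (ps.map (fun p => win player p.2 (d.push p.1))) a := by
  intro ps
  induction ps with
  | nil => intro a; rfl
  | cons p r ih =>
    intro a
    obtain ⟨k, t⟩ := p
    simp only [ofPairs, winO, List.map_cons, oppLoopA]
    have : (win player t (d.push k)).isEmpty = (win player t (d.push k) == []) := by
      cases win player t (d.push k) <;> rfl
    rw [this]
    split
    · rfl
    · exact ih _

theorem eval (player : Int) :
    ∀ (m : Nat) (ws : List String) (d : String),
      (∀ x ∈ ws, d.toList <+: x.toList) →
      maxLen ws + 1 - d.toList.length ≤ m →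
      win player (buildFold d ws) d = f player ws d := by
  intro m
  induction m using Nat.strong_induction_on with
  | _ m IH =>
    intro ws d hpre hm
    rw [buildFold_eq d ws hpre, f_eq]
    by_cases hcd : ws.contains d = true
    · have hcd' : d ∈ ws := List.contains_iff_mem.mp hcd
      have hcnd : (ws.contains d || ws.length == 1) = true := by rw [hcd, Bool.true_or]
      rw [if_pos hcnd]
      have hw : (if ws.length == 1 then ws.headD "" else d) = d := by
        by_cases h1 : ws.length = 1
        · obtain ⟨y, hy⟩ := List.length_eq_one_iff.mp h1
          subst hy
          have : d = y := by simpa using hcd'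
          simp [this]
        · simp [h1]
      rw [hw]
      simp [specT, win, hcd']
    · have hcdf : ws.contains d = false := by
        rcases h : ws.contains d
        · rfl
        · exact absurd h hcd
      have hdmem : d ∉ ws := fun h => hcd (List.contains_iff_mem.mpr h)
      by_cases h1 : ws.length = 1
      · obtain ⟨y, hy⟩ := List.length_eq_one_iff.mp h1
        subst hy
        have hcnd : (([y] : List String).contains d || ([y] : List String).length == 1) = true := by
          simp
        rw [if_pos hcnd]
        simp [specT, win, hdmem]
      · -- interior node
        have hn1 : (ws.length == 1) = false := by simp [h1]
        have hcnd : ¬ ((ws.contains d || ws.length == 1) = true) := by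
          rw [hcdf, hn1]
          exact Bool.false_ne_true
        rw [if_neg hcnd]
        have hwf : filterPrefix d ws = ws :=
          List.filter_eq_self.mpr (fun x hx => (slice_test_iff d x).mpr (hpre x hx))
        rw [hwf]
        have hnc : ∀ x ∈ ws, x ≠ d := fun x hx hxd => hdmem (hxd ▸ hx)
        have hfilterne : ws.filter (fun y => !(y == d)) = ws :=
          List.filter_eq_self.mpr (fun x hx => by simpa using hnc x hx)
        have hkeys : keysOf d ws = nextChars d ws := by
          rw [keysOf, nextChars, hfilterne]
        have hmaps :
            ((keysOf d ws).map
                (fun i => (i, buildFold (d.push i) (bucketOf d i (ws.filter (fun y => !(y == d))))))).map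
                (fun p => win player p.2 (d.push p.1))
              = (nextChars d ws).map (fun i => f player ws (d.push i)) := by
          rw [hfilterne, hkeys, List.map_map]
          refine List.map_congr_left (fun i hi => ?_)
          have hi' : i ∈ PySem.Set.ofList (ws.map (nextKey d)) := hi
          rw [PySem.Set.mem_ofList] at hi'
          obtain ⟨x0, hx0, hk0⟩ := List.mem_map.mp hi'
          have hbne : bucketOf d i ws ≠ [] := fun h => by
            have : x0 ∈ bucketOf d i ws := by
              unfold bucketOf; rw [List.mem_filter]; simp [hx0, hk0]
            rw [h] at this; cases this
          have hbsub : ∀ x ∈ bucketOf d i ws, x ∈ ws := fun x hx => List.mem_of_mem_filter hx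
          have hbkey : ∀ x ∈ bucketOf d i ws, nextKey d x = i := fun x hx => by
            have := List.of_mem_filter hx; simpa using this
          have hbpre : ∀ x ∈ bucketOf d i ws, (d.push i).toList <+: x.toList := fun x hx =>
            (prefix_push_iff (hpre x (hbsub x hx)) (hnc x (hbsub x hx))).mpr (hbkey x hx)
          have hlen : ∀ x ∈ bucketOf d i ws, d.toList.length + 1 ≤ x.toList.length :=
            fun x hx => strict_ext_len (hpre x (hbsub x hx)) (hnc x (hbsub x hx))
          have hlt : maxLen (bucketOf d i ws) + 1 - (d.push i).toList.length
              < maxLen ws + 1 - d.toList.length := by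
            rw [push_toList_length]
            exact measure_lt hbsub hbne hlen
          have hIH := IH _ (Nat.lt_of_lt_of_le hlt hm) (bucketOf d i ws) (d.push i)
            hbpre le_rfl
          show win player (buildFold (d.push i) (bucketOf d i ws)) (d.push i)
              = f player ws (d.push i)
          rw [hIH, ← shrink player ws d i hpre hnc hbne]
        -- reduce the win side
        rw [show specT d ws = Trie.mk ws.length (ws.contains d) ws.head?
              (ofPairs ((keysOf d ws).map
                (fun i => (i, buildFold (d.push i)
                  (bucketOf d i (ws.filter (fun y => !(y == d)))))))) from rfl]
        rw [win]
        have hl1e : ¬ ((ws.length == 1) = true) := by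
          rw [hn1]; exact Bool.false_ne_true
        rw [if_neg hcd, if_neg hl1e]
        by_cases hpar : (PySem.Str.len d % 2 == player) = true
        · rw [if_pos hpar, if_pos hpar, winU_ofPairs, hmaps]
        · rw [if_neg hpar, if_neg hpar, winO_ofPairs, hmaps]

-- === top-level glue ===

theorem main_eq (player : Int) (w : List String) (c : String) :
    f player w c = f_alt player w c := by
  by_cases hcond : (w.contains c || w.length == 1) = true
  · rw [f_eq, f_alt, if_pos hcond, if_pos hcond]
  · rw [f_eq, f_alt, if_neg hcond, if_neg hcond]
    simp only [suffix_toList]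
    rw [PySem.List.foldl_if_eq_foldl_filter]
    have hroot : (w.filter (fun x => PySem.Str.startswith x c)).foldl
        (fun t x => insertT t (x.toList.drop c.toList.length) x) emptyT
        = buildFold c (w.filter (fun x => PySem.Str.startswith x c)) := rfl
    rw [hroot]
    set wf := w.filter (fun x => PySem.Str.startswith x c) with hwfdef
    have hpre : ∀ x ∈ wf, c.toList <+: x.toList := fun x hx => by
      have := List.of_mem_filter hx
      rw [PySem.Str.startswith_eq, PySem.Chars.startswith_iff] at this
      exact this
    have hcw : c ∉ w := by
      intro h
      apply hcond
      rw [Bool.or_eq_true, List.contains_iff_mem]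
      exact Or.inl h
    have hcwf : c ∉ wf := fun h => hcw (List.mem_of_mem_filter h)
    rw [eval player _ wf c hpre le_rfl]
    -- now: A's interior over w = f player wf c
    rw [filterPrefix_eq_startswith, ← hwfdef]
    rcases hwfl : wf with _ | ⟨x, t⟩
    · -- no word extends c
      rw [f_eq]
      simp only [List.length_nil, List.contains, List.elem_nil]
      rw [show filterPrefix c ([] : List String) = [] from rfl]
      rw [show nextChars c ([] : List String) = [] from rfl]
      simp [oppLoopA]
    · rcases t with _ | ⟨y, t⟩
      · -- exactly one word extends c
        have hxc : x ≠ c := fun h => hcwf (by rw [hwfl, h]; simp)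
        have hinner : ∀ d : String, f player [x] d =
            (if PySem.Str.len x % 2 == 1 - player then [x] else []) := by
          intro d
          rw [f_eq]
          simp
        have hl : nextChars c [x] = [nextKey c x] := rfl
        rw [hl]
        simp only [List.map_cons, List.map_nil]
        rw [hinner, hinner]
        rcases hbase : (PySem.Str.len x % 2 == 1 - player) with _ | _
        · simp only [Bool.false_eq_true, if_false]
          rcases hpar : (PySem.Str.len c % 2 == player) with _ | _
          · simp [oppLoopA]
          · simp [union_nil_left, PySem.Set.ofList]
        · simp only [if_pos]
          rcases hpar : (PySem.Str.len c % 2 == player) with _ | _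
          · simp [oppLoopA, union_nil_left, PySem.Set.ofList, PySem.Set.add]
          · simp [union_nil_left, PySem.Set.ofList, PySem.Set.add]
      · -- at least two words extend c: identical interior expressions
        have hpre' : ∀ z ∈ x :: y :: t, c.toList <+: z.toList := by
          rw [← hwfl]; exact hpre
        have hcwf' : (x :: y :: t).contains c = false := by
          rw [Bool.eq_false_iff]
          intro h
          exact hcwf (by rw [hwfl]; exact List.contains_iff_mem.mp h)
        have hl1 : ((x :: y :: t).length == 1) = false := by simp
        have hc2 : ¬ (((x :: y :: t).contains c || (x :: y :: t).length == 1) = true) := by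
          rw [hcwf', hl1]
          exact Bool.false_ne_true
        have hff : filterPrefix c (x :: y :: t) = x :: y :: t :=
          List.filter_eq_self.mpr (fun z hz => (slice_test_iff c z).mpr (hpre' z hz))
        conv_rhs => rw [f_eq player (x :: y :: t) c, if_neg hc2, hff]

-- ===== VERDICT (by name: the statement is the Claim_ definition above) =====
theorem f_spec : Claim_equal_f := by
  intro player w c _
  unfold Spec_f
  exact main_eq player w c
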